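-- pv_equiv track=rewrite | github.com/luokailun/synthesizer | formula/Conjunct.py | ____get_var_mappings
-- ===== SOURCE A (Python) =====
-- import itertools
--
-- def ____get_var_mapping_tuples(var_listA, var_listB, share_var_num):
-- 	"""
-- 		sub-sub-procedure: mapping variable list B to variable list A
-- 	"""
-- 	to_vars_list = list(itertools.permutations(var_listA, share_var_num))
-- 	from_vars_list = list(itertools.combinations(var_listB, share_var_num))
-- 	#print list(to_vars_list)
-- 	#print list(from_vars_list)
-- 	var_mapping_tuple_list = [ (list(from_vars), list(to_vars))  for from_vars in from_vars_list for to_vars in to_vars_list ]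
-- 	return var_mapping_tuple_list
--
-- def ____get_var_mappings(sort_vars_dictA, sort_vars_dictB, max_var_num):
-- 	"""
-- 		sub-sub-procedure: determined how conjunctB's variables are mapped to conjunctA's
-- 	"""
-- 	# divide variables according to different sorts
--
-- 	var_mapping_tuple_list = [([],[])]
-- 	# for each sort, determined the mapping between two variable set
-- 	for Asort, Avar_list in sort_vars_dictA.items():
-- 		if Asort in sort_vars_dictB:
-- 			min_share_vars_num = len(Avar_list) + len(sort_vars_dictB[Asort]) - max_var_num
-- 			min_share = max([min_share_vars_num,0])
-- 			max_share = min([len(Avar_list),len(sort_vars_dictB[Asort])])+1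
-- 			temp_tuple_list = sum([____get_var_mapping_tuples(Avar_list, sort_vars_dictB[Asort], n) \
-- 				for n in range(min_share, max_share)], list())
-- 			var_mapping_tuple_list = [(a+c,b+d) for (a,b) in var_mapping_tuple_list for (c,d) in temp_tuple_list ]
--
-- 	return [ (from_list, to_list) for from_list, to_list in var_mapping_tuple_list]
-- ===== SOURCE B (Python) =====
-- import itertools
--
-- def ____get_var_mappings(sort_vars_dictA, sort_vars_dictB, max_var_num):
-- 	# Depth-first recursion over the shared sorts: build each complete mapping
-- 	# directly, extending the from/to prefixes, with no intermediate fragment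
-- 	# lists and no running cross-product accumulator.
-- 	shared = [(Avar_list, sort_vars_dictB[Asort])
-- 		for Asort, Avar_list in sort_vars_dictA.items() if Asort in sort_vars_dictB]
--
-- 	def dfs(rest, from_list, to_list):
-- 		if not rest:
-- 			return [(from_list, to_list)]
-- 		(Avs, Bvs), rest = rest[0], rest[1:]
-- 		lo = max(len(Avs) + len(Bvs) - max_var_num, 0)
-- 		hi = min(len(Avs), len(Bvs)) + 1
-- 		out = []
-- 		for n in range(lo, hi):
-- 			for c in itertools.combinations(Bvs, n):
-- 				for p in itertools.permutations(Avs, n):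
-- 					out.extend(dfs(rest, from_list + list(c), to_list + list(p)))
-- 		return out
--
-- 	return dfs(shared, [], [])
-- ===== Notes on version B (the rewrite author's own statement) =====
-- stated objective: alternative
-- what changed: A materializes per-sort fragment lists and repeatedly cross-combines them into a running accumulator; B never builds either: it recurses depth-first over the shared sorts, extending the from/to prefixes and emitting each complete mapping at the leaves.
import Mathlib
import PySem

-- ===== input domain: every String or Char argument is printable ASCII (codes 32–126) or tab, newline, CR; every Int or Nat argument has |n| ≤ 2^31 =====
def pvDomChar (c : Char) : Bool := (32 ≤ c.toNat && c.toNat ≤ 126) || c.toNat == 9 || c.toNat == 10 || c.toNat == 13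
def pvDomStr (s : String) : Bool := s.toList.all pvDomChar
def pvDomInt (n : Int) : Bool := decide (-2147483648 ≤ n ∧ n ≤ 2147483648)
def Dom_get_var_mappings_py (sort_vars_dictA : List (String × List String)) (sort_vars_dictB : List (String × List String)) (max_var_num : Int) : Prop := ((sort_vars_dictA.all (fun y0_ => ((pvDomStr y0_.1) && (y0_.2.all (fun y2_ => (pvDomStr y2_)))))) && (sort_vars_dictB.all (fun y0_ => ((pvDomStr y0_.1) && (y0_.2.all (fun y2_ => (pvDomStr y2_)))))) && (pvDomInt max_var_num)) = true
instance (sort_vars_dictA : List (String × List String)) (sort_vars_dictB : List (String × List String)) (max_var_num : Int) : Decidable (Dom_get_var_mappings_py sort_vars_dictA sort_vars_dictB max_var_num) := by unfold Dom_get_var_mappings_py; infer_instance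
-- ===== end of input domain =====

-- B replaces A's accumulator/cross-product construction by a depth-first recursion over the shared sorts (alternative decomposition, same cost).


-- ===== PORT A =====
-- A's helper ____get_var_mapping_tuples
-- (itertools.permutations -> PySem.List.permutations, itertools.combinations -> PySem.List.combinations)
def pvMappingTuples (var_listA var_listB : List String) (share_var_num : Nat) : List (List String × List String) :=
  let to_vars_list := PySem.List.permutations var_listA share_var_num
  let from_vars_list := PySem.List.combinations var_listB share_var_num
  from_vars_list.flatMap (fun from_vars => to_vars_list.map (fun to_vars => (from_vars, to_vars)))

-- A: fold the per-sort fragment lists into a running accumulator, cross-combining at each shared sort.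
-- (n in range(min_share, max_share) is nonnegative since min_share = max(…, 0), so n.toNat is exact.)
def get_var_mappings_py (sort_vars_dictA : List (String × List String)) (sort_vars_dictB : List (String × List String)) (max_var_num : Int) : List (List String × List String) :=
  let dA := PySem.Dict.ofList sort_vars_dictA
  let dB := PySem.Dict.ofList sort_vars_dictB
  let res := dA.items.foldl (fun acc p =>
    match dB.get? p.1 with
    | none => acc
    | some bvars =>
      let min_share : Int := max ((p.2.length : Int) + (bvars.length : Int) - max_var_num) 0
      let max_share : Int := min (p.2.length : Int) (bvars.length : Int) + 1
      let temp_tuple_list := (PySem.List.pyRange min_share max_share 1).foldl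
        (fun t n => t ++ pvMappingTuples p.2 bvars n.toNat) []
      acc.flatMap (fun ab => temp_tuple_list.map (fun cd => (ab.1 ++ cd.1, ab.2 ++ cd.2))))
    [([], [])]
  res.map (fun ft => (ft.1, ft.2))

-- ===== PORT B =====
-- B's dfs: depth-first recursion over the remaining shared sorts, extending the two prefixes.
def pvDfs (max_var_num : Int) : List (List String × List String) → List String → List String → List (List String × List String)
  | [], from_list, to_list => [(from_list, to_list)]
  | (avs, bvs) :: rest, from_list, to_list =>
      (PySem.List.pyRange (max ((avs.length : Int) + (bvs.length : Int) - max_var_num) 0)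
          (min (avs.length : Int) (bvs.length : Int) + 1) 1).flatMap
        (fun n => (PySem.List.combinations bvs n.toNat).flatMap
          (fun c => (PySem.List.permutations avs n.toNat).flatMap
            (fun p => pvDfs max_var_num rest (from_list ++ c) (to_list ++ p))))

-- B: list the shared sorts' variable-list pairs, then emit every mapping by one depth-first pass.
def get_var_mappings_py_alt (sort_vars_dictA : List (String × List String)) (sort_vars_dictB : List (String × List String)) (max_var_num : Int) : List (List String × List String) :=
  let dA := PySem.Dict.ofList sort_vars_dictA
  let dB := PySem.Dict.ofList sort_vars_dictB
  let shared := dA.items.filterMap (fun p => (dB.get? p.1).map (fun bvars => (p.2, bvars)))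
  pvDfs max_var_num shared [] []

-- ===== PRECONDITION & SPEC =====
def Spec_get_var_mappings_py (sort_vars_dictA : List (String × List String)) (sort_vars_dictB : List (String × List String)) (max_var_num : Int) (out : List (List String × List String)) : Prop := out = get_var_mappings_py_alt sort_vars_dictA sort_vars_dictB max_var_num
instance (sort_vars_dictA : List (String × List String)) (sort_vars_dictB : List (String × List String)) (max_var_num : Int) (out : List (List String × List String)) : Decidable (Spec_get_var_mappings_py sort_vars_dictA sort_vars_dictB max_var_num out) := by unfold Spec_get_var_mappings_py; infer_instance

-- ===== CLAIM (what is proved, stated in full; the proofs are below) =====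
def Claim_equal_get_var_mappings_py : Prop := ∀ (sort_vars_dictA : List (String × List String)) (sort_vars_dictB : List (String × List String)) (max_var_num : Int), Dom_get_var_mappings_py sort_vars_dictA sort_vars_dictB max_var_num → Spec_get_var_mappings_py sort_vars_dictA sort_vars_dictB max_var_num (get_var_mappings_py sort_vars_dictA sort_vars_dictB max_var_num)

-- ===== LEMMAS AND PROOFS =====

-- step function of A's accumulator loop (after the get? match has fired)
def pvStep (acc : List (List String × List String)) (ts : List (List String × List String)) : List (List String × List String) :=
  acc.flatMap (fun ab => ts.map (fun cd => (ab.1 ++ cd.1, ab.2 ++ cd.2)))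

-- the whole fragment list of one shared sort
def pvFragOf (m : Int) (s : List String × List String) : List (List String × List String) :=
  (PySem.List.pyRange (max ((s.1.length : Int) + (s.2.length : Int) - m) 0)
      (min (s.1.length : Int) (s.2.length : Int) + 1) 1).flatMap
    (fun n => pvMappingTuples s.1 s.2 n.toNat)

-- A's fold, rewritten as a fold of pvStep over the per-sort fragment lists
lemma pvFoldA (I : List (String × List String)) (dB : PySem.Dict String (List String))
    (m : Int) (acc : List (List String × List String)) :
    I.foldl (fun acc p =>
      match dB.get? p.1 with
      | none => acc
      | some bvars =>
        let min_share : Int := max ((p.2.length : Int) + (bvars.length : Int) - m) 0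
        let max_share : Int := min (p.2.length : Int) (bvars.length : Int) + 1
        let temp_tuple_list := (PySem.List.pyRange min_share max_share 1).foldl
          (fun t n => t ++ pvMappingTuples p.2 bvars n.toNat) []
        acc.flatMap (fun ab => temp_tuple_list.map (fun cd => (ab.1 ++ cd.1, ab.2 ++ cd.2)))) acc
      = ((I.filterMap (fun p => (dB.get? p.1).map (fun bvars => (p.2, bvars)))).map (pvFragOf m)).foldl pvStep acc := by
  induction I generalizing acc with
  | nil => rfl
  | cons p I ih =>
    simp only [List.foldl_cons, List.filterMap_cons]
    cases h : dB.get? p.1 with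
    | none => simpa [h] using ih _
    | some bvars =>
      simp only [Option.map_some, List.map_cons, List.foldl_cons]
      rw [ih]
      congr 1
      simp only [pvStep, pvFragOf, PySem.List.foldl_append_eq_flatMap, List.nil_append]

-- a pvStep fold distributes over its accumulator list
lemma pvFoldlSplit (L : List (List (List String × List String)))
    (acc : List (List String × List String)) :
    L.foldl pvStep acc = acc.flatMap (fun ab => L.foldl pvStep [ab]) := by
  induction L generalizing acc with
  | nil => simp
  | cons ts L ih =>
    simp only [List.foldl_cons]
    rw [ih, show (fun ab => L.foldl pvStep (pvStep [ab] ts))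
        = fun ab => (pvStep [ab] ts).flatMap (fun x => L.foldl pvStep [x]) from
      funext fun ab => ih _]
    simp [pvStep, List.flatMap_assoc, List.flatMap_map]

-- B's dfs equals the pvStep fold started from the given prefixes
lemma pvDfsEq (m : Int) (S : List (List String × List String)) (fr tl : List String) :
    pvDfs m S fr tl = (S.map (pvFragOf m)).foldl pvStep [(fr, tl)] := by
  induction S generalizing fr tl with
  | nil => rfl
  | cons s S ih =>
    obtain ⟨avs, bvs⟩ := s
    simp only [pvDfs, List.map_cons, List.foldl_cons]
    rw [pvFoldlSplit]
    simp only [pvStep, pvFragOf, pvMappingTuples, List.flatMap_assoc, List.flatMap_map,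
      List.map_map]
    simp [ih]

-- ===== VERDICT (by name: the statement is the Claim_ definition above) =====
theorem get_var_mappings_py_spec : Claim_equal_get_var_mappings_py := by
  intro A B m _
  show get_var_mappings_py A B m = get_var_mappings_py_alt A B m
  simp only [get_var_mappings_py, get_var_mappings_py_alt]
  rw [pvFoldA, pvDfsEq]
  simp
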